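-- pv_equiv track=rewrite | github.com/Chaeguevara/playGround | algorithm/alg_eject/Backjun/7579.py | get_minimum_memeroy_cost
-- ===== SOURCE A (Python) =====
-- def get_minimum_memeroy_cost(num_app_and_memory:tuple,
--                             occ_memory:list[int],
--                             deactive_cost:list[int]
--                              )->int:
--     """ Knapsack?
--     """
--     # base case
--     if num_app_and_memory[0] ==0:
--         raise ValueError
--     result = 0
--     required_memory = num_app_and_memory[1]
--     for deac_cost,occ_mem in sorted(zip(deactive_cost,occ_memory)):
--         # condition met
--         if required_memory <= 0:
--             break
--         required_memory -= occ_mem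
--         result += deac_cost
--     # even after all loop, if required memory is not secured then throw error
--     if required_memory > 0:
--         raise ValueError
--     return result
-- ===== SOURCE B (Python) =====
-- def get_minimum_memeroy_cost(num_app_and_memory: tuple,
--                              occ_memory: list,
--                              deactive_cost: list) -> int:
--     if num_app_and_memory[0] == 0:
--         raise ValueError
--     need = num_app_and_memory[1]
--     pairs = sorted(zip(deactive_cost, occ_memory))
--     # prefix sums of occupied memory, cheapest pairs first
--     sums = []
--     cum = 0
--     for _, occ in pairs:
--         cum += occ
--         sums.append(cum)
--     # length of the shortest prefix that frees enough memory
--     k = next((i + 1 for i, s in enumerate(sums) if s >= need), None)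
--     if need <= 0:
--         return 0
--     if k is None:
--         raise ValueError
--     return sum(cost for cost, _ in pairs[:k])
-- ===== Notes on version B (the rewrite author's own statement) =====
-- stated objective: alternative
-- what changed: Replaces A's single stateful loop (running required_memory with an early break) by three plain passes: build the prefix sums of occupied memory over the cheapest-first pairs, find the first index where the prefix sum covers the requirement, and return the cost sum of that prefix.
import Mathlib
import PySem

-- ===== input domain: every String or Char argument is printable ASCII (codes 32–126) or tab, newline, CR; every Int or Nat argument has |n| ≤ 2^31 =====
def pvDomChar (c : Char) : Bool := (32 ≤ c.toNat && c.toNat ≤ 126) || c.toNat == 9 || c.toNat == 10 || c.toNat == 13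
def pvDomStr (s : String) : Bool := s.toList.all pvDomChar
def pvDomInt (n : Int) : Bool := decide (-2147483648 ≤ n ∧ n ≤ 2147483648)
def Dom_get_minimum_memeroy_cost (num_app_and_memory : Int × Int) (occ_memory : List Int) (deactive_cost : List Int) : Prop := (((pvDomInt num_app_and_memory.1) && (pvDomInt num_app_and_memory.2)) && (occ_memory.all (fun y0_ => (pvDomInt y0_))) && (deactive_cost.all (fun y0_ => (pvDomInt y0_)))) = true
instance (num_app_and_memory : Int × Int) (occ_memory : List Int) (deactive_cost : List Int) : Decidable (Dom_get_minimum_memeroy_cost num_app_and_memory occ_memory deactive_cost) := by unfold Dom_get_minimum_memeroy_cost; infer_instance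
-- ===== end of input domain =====

-- B replaces A's accumulate-and-break loop by three plain passes (prefix sums, first
-- crossing index, prefix cost sum); objective: alternative decomposition, same cost.

-- ===== PORT A =====
-- the two 'raise ValueError' sites of A are exactly the inputs excluded by Pre_ below
def get_minimum_memeroy_cost (num_app_and_memory : Int × Int) (occ_memory : List Int) (deactive_cost : List Int) : Int :=
  let st := (PySem.List.sorted2 (deactive_cost.zip occ_memory) Prod.fst Prod.snd).foldl
    (fun (st : Int × Int × Bool) p =>
      if st.2.2 then st                                  -- loop already left via 'break'
      else if st.2.1 ≤ 0 then (st.1, st.2.1, true)       -- 'if required_memory <= 0: break'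
      else (st.1 + p.1, st.2.1 - p.2, false))            -- required -= occ; result += cost
    (0, num_app_and_memory.2, false)
  st.1

-- ===== PORT B =====
-- running prefix sums of occupied memory ('for _, occ in pairs: cum += occ; sums.append(cum)')
def altSums : List (Int × Int) → Int → List Int
  | [], _ => []
  | p :: ps, cum => (cum + p.2) :: altSums ps (cum + p.2)

-- 'next((i + 1 for i, s in enumerate(sums) if s >= need), None)'
def altFind : List Int → Int → Nat → Option Nat
  | [], _, _ => none
  | s :: ss, need, i => if need ≤ s then some (i + 1) else altFind ss need (i + 1)

def get_minimum_memeroy_cost_alt (num_app_and_memory : Int × Int) (occ_memory : List Int) (deactive_cost : List Int) : Int :=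
  let need := num_app_and_memory.2
  let pairs := PySem.List.sorted2 (deactive_cost.zip occ_memory) Prod.fst Prod.snd
  let sums := altSums pairs 0
  let k := altFind sums need 0
  if need ≤ 0 then 0
  else match k with
    | none => 0                                          -- B raises ValueError here; outside Pre_
    | some k => ((pairs.take k).map Prod.fst).sum        -- 'sum(cost for cost, _ in pairs[:k])'

-- ===== PRECONDITION & SPEC =====
-- Pre_ excludes exactly the inputs where A raises ValueError: a zero app count, and a
-- required memory that no prefix of the cheapest-first pair list can cover.
def Pre_get_minimum_memeroy_cost (num_app_and_memory : Int × Int) (occ_memory : List Int) (deactive_cost : List Int) : Prop :=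
  num_app_and_memory.1 ≠ 0 ∧
  ∃ k ∈ List.range ((deactive_cost.zip occ_memory).length + 1),
    num_app_and_memory.2 ≤
      (((PySem.List.sorted2 (deactive_cost.zip occ_memory) Prod.fst Prod.snd).map Prod.snd).take k).sum
instance (num_app_and_memory : Int × Int) (occ_memory : List Int) (deactive_cost : List Int) : Decidable (Pre_get_minimum_memeroy_cost num_app_and_memory occ_memory deactive_cost) := by unfold Pre_get_minimum_memeroy_cost; infer_instance

def pvWitness_get_minimum_memeroy_cost : (Int × Int) × List Int × List Int := ((1, 3), [2, 2], [1, 5])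

def Spec_get_minimum_memeroy_cost (num_app_and_memory : Int × Int) (occ_memory : List Int) (deactive_cost : List Int) (out : Int) : Prop := out = get_minimum_memeroy_cost_alt num_app_and_memory occ_memory deactive_cost
instance (num_app_and_memory : Int × Int) (occ_memory : List Int) (deactive_cost : List Int) (out : Int) : Decidable (Spec_get_minimum_memeroy_cost num_app_and_memory occ_memory deactive_cost out) := by unfold Spec_get_minimum_memeroy_cost; infer_instance

-- ===== CLAIM (what is proved, stated in full; the proofs are below) =====
def Claim_equal_get_minimum_memeroy_cost : Prop := ∀ (num_app_and_memory : Int × Int) (occ_memory : List Int) (deactive_cost : List Int), Dom_get_minimum_memeroy_cost num_app_and_memory occ_memory deactive_cost → Pre_get_minimum_memeroy_cost num_app_and_memory occ_memory deactive_cost → Spec_get_minimum_memeroy_cost num_app_and_memory occ_memory deactive_cost (get_minimum_memeroy_cost num_app_and_memory occ_memory deactive_cost)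

-- ===== LEMMAS AND PROOFS =====

-- the common greedy recursion both programs compute on the sorted pair list
def gSpec : Int → List (Int × Int) → Int
  | _, [] => 0
  | need, p :: ps => if need ≤ 0 then 0 else p.1 + gSpec (need - p.2) ps

def aStep (st : Int × Int × Bool) (p : Int × Int) : Int × Int × Bool :=
  if st.2.2 then st
  else if st.2.1 ≤ 0 then (st.1, st.2.1, true)
  else (st.1 + p.1, st.2.1 - p.2, false)

theorem aStep_broken (l : List (Int × Int)) (r m : Int) :
    l.foldl aStep (r, m, true) = (r, m, true) := by
  induction l with
  | nil => rfl
  | cons p ps ih => simp [List.foldl, aStep, ih]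

theorem aStep_run (l : List (Int × Int)) : ∀ (r m : Int),
    (l.foldl aStep (r, m, false)).1 = r + gSpec m l := by
  induction l with
  | nil => intro r m; simp [gSpec]
  | cons p ps ih =>
    intro r m
    by_cases h : m ≤ 0
    · simp [List.foldl, aStep, h, aStep_broken, gSpec]
    · show (List.foldl aStep (aStep (r, m, false) p) ps).1 = _
      have hst : aStep (r, m, false) p = (r + p.1, m - p.2, false) := by
        simp [aStep, h]
      rw [hst, ih]
      simp only [gSpec, if_neg h]
      ring

theorem altSums_shift (ps : List (Int × Int)) : ∀ (c d : Int),
    altSums ps (c + d) = (altSums ps c).map (· + d) := by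
  induction ps with
  | nil => intro c d; rfl
  | cons p ps ih =>
    intro c d
    simp only [altSums, List.map]
    rw [show c + d + p.2 = c + p.2 + d by ring, ih (c + p.2) d]

theorem altFind_shift (ss : List Int) : ∀ (need : Int) (i : Nat),
    altFind ss need (i + 1) = (altFind ss need i).map (· + 1) := by
  induction ss with
  | nil => intro need i; rfl
  | cons s ss ih =>
    intro need i
    by_cases h : need ≤ s
    · simp [altFind, h]
    · simp [altFind, h, ih]

theorem altFind_map_shift (ss : List Int) : ∀ (need c : Int) (i : Nat),
    altFind (ss.map (· + c)) need i = altFind ss (need - c) i := by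
  induction ss with
  | nil => intro need c i; rfl
  | cons s ss ih =>
    intro need c i
    by_cases h : need ≤ s + c
    · simp [altFind, h, show need - c ≤ s by omega]
    · simp [altFind, h, show ¬ need - c ≤ s by omega, ih]

theorem altFind_none (ss : List Int) : ∀ (need : Int) (i : Nat),
    altFind ss need i = none → ∀ s ∈ ss, s < need := by
  induction ss with
  | nil => intro need i _ s hs; cases hs
  | cons s0 ss ih =>
    intro need i h s hs
    by_cases hc : need ≤ s0
    · simp [altFind, hc] at h
    · simp only [altFind, if_neg hc] at h
      rcases List.mem_cons.mp hs with rfl | hs'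
      · omega
      · exact ih need (i + 1) h s hs'

theorem mem_altSums (ps : List (Int × Int)) : ∀ (c : Int) (k : Nat), 1 ≤ k → k ≤ ps.length →
    c + (((ps.map Prod.snd).take k).sum) ∈ altSums ps c := by
  induction ps with
  | nil => intro c k h1 h2; simp at h2; omega
  | cons p ps ih =>
    intro c k h1 h2
    match k with
    | 1 => simp [altSums, List.take]
    | k + 2 =>
      simp only [altSums, List.map, List.take, List.sum_cons, List.mem_cons]
      right
      have hmem := ih (c + p.2) (k + 1) (by omega) (by simpa using h2)
      rw [← add_assoc]
      exact hmem

-- B's core computation on an arbitrary pair list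
def bCore (need : Int) (pairs : List (Int × Int)) : Int :=
  if need ≤ 0 then 0
  else match altFind (altSums pairs 0) need 0 with
    | none => 0
    | some k => ((pairs.take k).map Prod.fst).sum

theorem gSpec_nonpos (ps : List (Int × Int)) (m : Int) (h : m ≤ 0) : gSpec m ps = 0 := by
  cases ps with
  | nil => rfl
  | cons p ps => simp [gSpec, h]

theorem bCore_eq_gSpec (pairs : List (Int × Int)) : ∀ (need : Int),
    (∃ k ∈ List.range (pairs.length + 1), need ≤ ((pairs.map Prod.snd).take k).sum) →
    bCore need pairs = gSpec need pairs := by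
  induction pairs with
  | nil =>
    intro need h
    rcases h with ⟨k, hk, hle⟩
    simp at hk
    subst hk
    simp at hle
    simp [bCore, gSpec, hle]
  | cons p ps ih =>
    intro need h
    by_cases h0 : need ≤ 0
    · simp [bCore, gSpec, h0]
    · simp only [bCore, gSpec, if_neg h0]
      have hsums : altSums (p :: ps) 0 = p.2 :: (altSums ps 0).map (· + p.2) := by
        show (0 + p.2) :: altSums ps (0 + p.2) = _
        rw [show (0 : Int) + p.2 = 0 + p.2 from rfl, altSums_shift]
        simp
      rw [hsums]
      by_cases h1 : need ≤ p.2
      · simp [altFind, h1, List.take, gSpec_nonpos ps (need - p.2) (by omega)]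
      · simp only [altFind, if_neg h1]
        rw [altFind_shift, altFind_map_shift]
        -- transfer the covering hypothesis to ps / need - p.2
        have h' : ∃ k ∈ List.range (ps.length + 1), need - p.2 ≤ ((ps.map Prod.snd).take k).sum := by
          rcases h with ⟨k, hk, hle⟩
          simp only [List.mem_range, List.length_cons] at hk
          match k with
          | 0 => simp at hle; omega
          | 1 => simp [List.take] at hle; omega
          | k + 2 =>
            refine ⟨k + 1, by simp; omega, ?_⟩
            simp only [List.map, List.take, List.sum_cons] at hle
            omega
        have hIH := ih (need - p.2) h'
        cases hfind : altFind (altSums ps 0) (need - p.2) 0 with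
        | none =>
          exfalso
          rcases h' with ⟨k, hk, hle⟩
          simp only [List.mem_range] at hk
          have hk1 : 1 ≤ k := by
            by_contra hkk
            have : k = 0 := by omega
            subst this; simp at hle; omega
          have hmem := mem_altSums ps 0 k hk1 (by omega)
          have := altFind_none (altSums ps 0) (need - p.2) 0 hfind _ (by simpa using hmem)
          simp at this
          omega
        | some j =>
          simp only [Option.map_some]
          simp only [bCore, if_neg (show ¬ need - p.2 ≤ 0 by omega), hfind] at hIH
          rw [← hIH]
          simp [List.take]

-- ===== VERDICT (by name: the statement is the Claim_ definition above) =====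
theorem get_minimum_memeroy_cost_spec : Claim_equal_get_minimum_memeroy_cost := by
  intro nm occ dc _ hpre
  unfold Spec_get_minimum_memeroy_cost
  rcases hpre with ⟨-, hcov⟩
  set pairs := PySem.List.sorted2 (dc.zip occ) Prod.fst Prod.snd with hpairs
  have hlen : pairs.length = (dc.zip occ).length :=
    (PySem.List.sorted2_perm (dc.zip occ) Prod.fst Prod.snd false).length_eq
  have hA : get_minimum_memeroy_cost nm occ dc = 0 + gSpec nm.2 pairs := by
    show (pairs.foldl aStep (0, nm.2, false)).1 = _
    exact aStep_run pairs 0 nm.2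
  have hB : get_minimum_memeroy_cost_alt nm occ dc = bCore nm.2 pairs := rfl
  rw [hA, hB, zero_add]
  rw [bCore_eq_gSpec]
  rw [hlen]
  exact hcov
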